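-- pv_equiv track=rewrite | github.com/CogComp/SRL-English | srl_english/src/convert_id_to_srl_input.py | shift_indices_for_empty_strings
-- ===== SOURCE A (Python) =====
-- def shift_indices_for_empty_strings(words, indices):
--     shiftleft = 0
--     new_indices = []
--     new_words = []
--     for idx, word in enumerate(words):
--         if word=="" or word.isspace():
--             shiftleft += 1
--         else:
--             if idx in indices:
--                 new_indices.append(idx-shiftleft)
--             new_words.append(word)
--     return new_words, new_indices
-- ===== SOURCE B (Python) =====
-- def shift_indices_for_empty_strings(words, indices):
--     blank = [w == "" or w.isspace() for w in words]
--     shift = [0]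
--     for b in blank:
--         shift.append(shift[-1] + b)
--     new_words = [w for w, b in zip(words, blank) if not b]
--     idxset = set(indices)
--     new_indices = [i - shift[i] for i in range(len(words))
--                    if not blank[i] and i in idxset]
--     return new_words, new_indices
-- ===== Notes on version B (the rewrite author's own statement) =====
-- stated objective: faster
-- what changed: Replaces A's single stateful loop (running shift counter, 'idx in indices' list scan per word) by separate passes: a blank mask, a prefix-sum shift table, a filtering pass for new_words, and a range comprehension testing membership in a precomputed set and emitting i - shift[i].
import Mathlib
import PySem

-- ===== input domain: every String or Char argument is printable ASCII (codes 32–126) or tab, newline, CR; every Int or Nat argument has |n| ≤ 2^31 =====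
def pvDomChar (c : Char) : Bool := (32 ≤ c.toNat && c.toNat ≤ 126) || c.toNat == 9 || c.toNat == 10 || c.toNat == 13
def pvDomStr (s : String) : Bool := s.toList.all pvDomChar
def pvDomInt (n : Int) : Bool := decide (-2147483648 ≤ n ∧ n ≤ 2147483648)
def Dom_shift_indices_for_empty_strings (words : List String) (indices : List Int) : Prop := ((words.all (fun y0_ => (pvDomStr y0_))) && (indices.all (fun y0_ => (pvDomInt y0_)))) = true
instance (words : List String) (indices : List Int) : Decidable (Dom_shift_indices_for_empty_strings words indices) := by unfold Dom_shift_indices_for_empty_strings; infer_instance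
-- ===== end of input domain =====

-- B replaces A's single loop with a running counter by separate passes: a blank
-- mask, a prefix-sum shift table, a filter for new_words, and a range
-- comprehension emitting i - shift[i] with membership in a precomputed set
-- instead of A's per-word list scan (measured faster on large inputs).

-- ===== PORT A =====
def shift_indices_for_empty_strings (words : List String) (indices : List Int) : List String × List Int :=
  let r := (PySem.List.enumerate words 0).foldl
    (fun (st : Int × List Int × List String) p =>
      if p.2 == "" || PySem.Str.strIsspace p.2 then
        (st.1 + 1, st.2.1, st.2.2)
      else
        (st.1,
         if p.1 ∈ indices then st.2.1 ++ [p.1 - st.1] else st.2.1,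
         st.2.2 ++ [p.2]))
    (0, [], [])
  (r.2.2, r.2.1)

-- ===== PORT B =====
def shift_indices_for_empty_strings_alt (words : List String) (indices : List Int) : List String × List Int :=
  let blank := words.map (fun w => (w == "") || PySem.Str.strIsspace w)
  let shift := blank.foldl (fun (acc : List Int) b => acc ++ [PySem.List.pyGetD acc (-1) 0 + (if b then 1 else 0)]) ([0] : List Int)
  let new_words := ((words.zip blank).filter (fun p => !p.2)).map (·.1)
  let idxset := PySem.Set.ofList indices
  let new_indices := (PySem.List.pyRange 0 (words.length : Int) 1).filterMap
      (fun i => if !(blank.getD i.toNat true) && idxset.contains i then some (i - shift.getD i.toNat 0) else none)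
  (new_words, new_indices)

-- ===== PRECONDITION & SPEC =====
def Spec_shift_indices_for_empty_strings (words : List String) (indices : List Int) (out : List String × List Int) : Prop := out = shift_indices_for_empty_strings_alt words indices
instance (words : List String) (indices : List Int) (out : List String × List Int) : Decidable (Spec_shift_indices_for_empty_strings words indices out) := by unfold Spec_shift_indices_for_empty_strings; infer_instance

-- ===== CLAIM (what is proved, stated in full; the proofs are below) =====
def Claim_equal_shift_indices_for_empty_strings : Prop := ∀ (words : List String) (indices : List Int), Dom_shift_indices_for_empty_strings words indices → Spec_shift_indices_for_empty_strings words indices (shift_indices_for_empty_strings words indices)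

-- ===== LEMMAS AND PROOFS =====

-- blank test shared by the reference recursion
def pvBlank (w : String) : Bool := (w == "") || PySem.Str.strIsspace w

-- reference recursion: what both programs compute on the suffix ws, when ws
-- starts at absolute position i and s blanks were seen before it
def pvGo (indices : List Int) : List String → Int → Int → List String × List Int
  | [], _, _ => ([], [])
  | w :: ws, i, s =>
    if pvBlank w then pvGo indices ws (i + 1) (s + 1)
    else
      let r := pvGo indices ws (i + 1) s
      (w :: r.1, (if i ∈ indices then [i - s] else []) ++ r.2)

-- prefix-sum scan: the contents of B's shift table from base value s
def pvScan : List Bool → Int → List Int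
  | [], s => [s]
  | b :: bs, s => s :: pvScan bs (s + (if b then 1 else 0))

-- B's shift-table fold builds exactly pvScan
theorem pvShift_fold (bs : List Bool) : ∀ (pre : List Int) (s : Int),
    bs.foldl (fun (acc : List Int) b => acc ++ [PySem.List.pyGetD acc (-1) 0 + (if b then 1 else 0)]) (pre ++ [s])
      = pre ++ pvScan bs s := by
  induction bs with
  | nil => intro pre s; simp [pvScan]
  | cons b bs ih =>
    intro pre s
    have hlast : PySem.List.pyGetD (pre ++ [s]) (-1) 0 = s := by
      simp [PySem.List.pyGetD, PySem.List.pyGet?, PySem.List.pyIdx?]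
    simp only [List.foldl_cons, hlast]
    have : pre ++ [s] ++ [s + (if b then 1 else 0)] = (pre ++ [s]) ++ [s + (if b then 1 else 0)] := rfl
    rw [this, ih (pre ++ [s]) (s + (if b then 1 else 0))]
    simp [pvScan]

-- A's fold on the enumerated suffix, fully generalised
theorem pvA_fold (indices : List Int) : ∀ (ws : List String) (i s : Int) (ni : List Int) (nw : List String),
    (PySem.List.enumerate ws i).foldl
      (fun (st : Int × List Int × List String) p =>
        if p.2 == "" || PySem.Str.strIsspace p.2 then
          (st.1 + 1, st.2.1, st.2.2)
        else
          (st.1,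
           if p.1 ∈ indices then st.2.1 ++ [p.1 - st.1] else st.2.1,
           st.2.2 ++ [p.2]))
      (s, ni, nw)
      = (s + (ws.countP pvBlank : Int), ni ++ (pvGo indices ws i s).2, nw ++ (pvGo indices ws i s).1) := by
  intro ws
  induction ws with
  | nil => intro i s ni nw; simp [PySem.List.enumerate_nil, pvGo]
  | cons w ws ih =>
    intro i s ni nw
    rw [PySem.List.enumerate_cons, List.foldl_cons]
    by_cases hb : pvBlank w
    · have hb' : (w == "" || PySem.Str.strIsspace w) = true := hb
      simp only [hb', pvGo, hb, if_true]
      rw [ih (i + 1) (s + 1) ni nw]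
      simp [hb]
      ring_nf
    · have hb' : (w == "" || PySem.Str.strIsspace w) = false := by
        simpa [pvBlank] using hb
      simp only [hb', Bool.false_eq_true, if_false, pvGo, hb]
      rw [ih (i + 1) s (if i ∈ indices then ni ++ [i - s] else ni) (nw ++ [w])]
      simp [hb]
      by_cases hm : i ∈ indices <;> simp [hm]

-- first component of pvGo is just the filter of non-blank words
theorem pvGo_fst (indices : List Int) : ∀ (ws : List String) (i s : Int),
    (pvGo indices ws i s).1 = ws.filter (fun w => !pvBlank w) := by
  intro ws
  induction ws with
  | nil => intro i s; simp [pvGo]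
  | cons w ws ih =>
    intro i s
    by_cases hb : pvBlank w <;> simp [pvGo, hb, ih]

-- B's new_words pass produces the same filter
theorem pvB_words (ws : List String) :
    (((ws.zip (ws.map pvBlank)).filter (fun p => !p.2)).map (·.1)) = ws.filter (fun w => !pvBlank w) := by
  induction ws with
  | nil => rfl
  | cons w ws ih =>
    by_cases hb : pvBlank w <;> simp [hb, ih]

-- B's range comprehension equals the second component of pvGo
theorem pvB_idx (indices : List Int) : ∀ (ws : List String) (i s : Int), 0 ≤ i →
    (PySem.List.pyRange i (i + (ws.length : Int)) 1).filterMap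
      (fun j => if !((ws.map pvBlank).getD (j - i).toNat true) && decide (j ∈ indices)
                then some (j - (pvScan (ws.map pvBlank) s).getD (j - i).toNat 0) else none)
      = (pvGo indices ws i s).2 := by
  intro ws
  induction ws with
  | nil =>
    intro i s _
    rw [PySem.List.pyRange_one_eq_nil (by simp)]
    simp [pvGo]
  | cons w ws ih =>
    intro i s hi
    have hlen : (((w :: ws).length : Int)) = (ws.length : Int) + 1 := by simp
    have hlt : i < i + ((w :: ws).length : Int) := by omega
    rw [PySem.List.pyRange_one_cons hlt]
    have h0 : (i - i).toNat = 0 := by omega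
    have harg : i + ((w :: ws).length : Int) = (i + 1) + (ws.length : Int) := by omega
    by_cases hb : pvBlank w
    · have htail :
          (PySem.List.pyRange (i + 1) (i + ((w :: ws).length : Int)) 1).filterMap
            (fun j => if !(((w :: ws).map pvBlank).getD (j - i).toNat true) && decide (j ∈ indices)
                      then some (j - (pvScan ((w :: ws).map pvBlank) s).getD (j - i).toNat 0) else none)
          = (pvGo indices ws (i + 1) (s + 1)).2 := by
        rw [harg, ← ih (i + 1) (s + 1) (by omega)]
        apply List.filterMap_congr
        intro j hj
        have hj' : i + 1 ≤ j := (PySem.List.mem_pyRange_one.mp hj).1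
        have hsub : (j - i).toNat = (j - (i + 1)).toNat + 1 := by omega
        simp [hsub, pvScan, hb]
      have hhead : (if !(((w :: ws).map pvBlank).getD (i - i).toNat true) && decide (i ∈ indices)
                      then some (i - (pvScan ((w :: ws).map pvBlank) s).getD (i - i).toNat 0) else none)
          = (none : Option Int) := by
        simp [hb]
      rw [List.filterMap_cons, hhead, htail]
      simp [pvGo, hb]
    · have htail :
          (PySem.List.pyRange (i + 1) (i + ((w :: ws).length : Int)) 1).filterMap
            (fun j => if !(((w :: ws).map pvBlank).getD (j - i).toNat true) && decide (j ∈ indices)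
                      then some (j - (pvScan ((w :: ws).map pvBlank) s).getD (j - i).toNat 0) else none)
          = (pvGo indices ws (i + 1) s).2 := by
        rw [harg, ← ih (i + 1) s (by omega)]
        apply List.filterMap_congr
        intro j hj
        have hj' : i + 1 ≤ j := (PySem.List.mem_pyRange_one.mp hj).1
        have hsub : (j - i).toNat = (j - (i + 1)).toNat + 1 := by omega
        simp [hsub, pvScan, hb]
      by_cases hm : i ∈ indices
      · have hhead : (if !(((w :: ws).map pvBlank).getD (i - i).toNat true) && decide (i ∈ indices)
                        then some (i - (pvScan ((w :: ws).map pvBlank) s).getD (i - i).toNat 0) else none)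
            = some (i - s) := by
          simp [hb, hm, pvScan]
        rw [List.filterMap_cons, hhead, htail]
        simp [pvGo, hb, hm]
      · have hhead : (if !(((w :: ws).map pvBlank).getD (i - i).toNat true) && decide (i ∈ indices)
                        then some (i - (pvScan ((w :: ws).map pvBlank) s).getD (i - i).toNat 0) else none)
            = (none : Option Int) := by
          simp [hb, hm]
        rw [List.filterMap_cons, hhead, htail]
        simp [pvGo, hb, hm]

-- Set.ofList membership test agrees with list membership
theorem pvSet_contains (indices : List Int) (j : Int) :
    (PySem.Set.ofList indices).contains j = decide (j ∈ indices) := by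
  by_cases h : j ∈ indices
  · simp [h, PySem.Set.mem_ofList]
  · simp only [h, decide_false]
    rw [Bool.eq_false_iff]
    intro hc
    exact h ((PySem.Set.mem_ofList _ _).mp (by simpa [List.contains_iff_mem] using hc))

-- ===== VERDICT (by name: the statement is the Claim_ definition above) =====
theorem shift_indices_for_empty_strings_spec : Claim_equal_shift_indices_for_empty_strings := by
  intro words indices _
  unfold Spec_shift_indices_for_empty_strings
  unfold shift_indices_for_empty_strings shift_indices_for_empty_strings_alt
  simp only []
  rw [pvA_fold indices words 0 0 [] []]
  have hshift : (words.map (fun w => (w == "") || PySem.Str.strIsspace w)).foldl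
      (fun (acc : List Int) b => acc ++ [PySem.List.pyGetD acc (-1) 0 + (if b then 1 else 0)]) ([0] : List Int)
      = pvScan (words.map pvBlank) 0 := by
    have := pvShift_fold (words.map pvBlank) [] 0
    simpa [pvBlank] using this
  have hidx : (PySem.List.pyRange 0 (words.length : Int) 1).filterMap
      (fun i => if !((words.map (fun w => (w == "") || PySem.Str.strIsspace w)).getD i.toNat true)
                    && (PySem.Set.ofList indices).contains i
                then some (i - ((words.map (fun w => (w == "") || PySem.Str.strIsspace w)).foldl
                    (fun (acc : List Int) b => acc ++ [PySem.List.pyGetD acc (-1) 0 + (if b then 1 else 0)]) ([0] : List Int)).getD i.toNat 0)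
                else none)
      = (pvGo indices words 0 0).2 := by
    rw [hshift]
    have h := pvB_idx indices words 0 0 (le_refl 0)
    simp only [zero_add] at h
    have hfun : (fun w => (w == "") || PySem.Str.strIsspace w) = pvBlank := rfl
    rw [hfun, ← h]
    apply List.filterMap_congr
    intro j hj
    rw [pvSet_contains]
    simp
  have hw : (((words.zip (words.map (fun w => (w == "") || PySem.Str.strIsspace w))).filter
      (fun p => !p.2)).map (·.1)) = (pvGo indices words 0 0).1 := by
    rw [pvGo_fst indices words 0 0]
    simpa [pvBlank] using pvB_words words
  simp only [List.nil_append] at *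
  refine Prod.ext ?_ ?_
  · simpa using hw.symm
  · simpa using hidx.symm
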